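-- pv_equiv track=rewrite | github.com/YashGames2007/MyCodePrograms | Python/Practice Coding Proplems/day_9.py | robot_path
-- ===== SOURCE A (Python) =====
-- def robot_path(commands: list[str]) -> bool:
--
--     """
--     Function DocString
--     """
--     required_dest = [[3, 2], [-4, 3]]
--     x_pos, y_pos = 0, 0      # Position of the robot
--
--     for command in commands:
--         if command == "n":
--             y_pos += 1
--         elif command == "e":
--             x_pos += 1
--         elif command == "s":
--             y_pos -= 1
--         elif command == "w":
--             x_pos -= 1
--
--     if [x_pos, y_pos] in required_dest:
--         return True
--     return False
-- ===== SOURCE B (Python) =====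
-- def robot_path(commands: list[str]) -> bool:
--     # Goal regression: instead of moving the robot, move the required
--     # destinations in the opposite direction of each command; the robot
--     # ends on a destination iff the origin ends on a regressed destination.
--     delta = {"n": (0, 1), "e": (1, 0), "s": (0, -1), "w": (-1, 0)}
--     goals = [(3, 2), (-4, 3)]
--     for command in commands:
--         dx, dy = delta.get(command, (0, 0))
--         goals = [(gx - dx, gy - dy) for gx, gy in goals]
--     return (0, 0) in goals
-- ===== Notes on version B (the rewrite author's own statement) =====
-- stated objective: alternative
-- what changed: Goal-regression algorithm: B keeps no robot position at all; it shifts the two required destinations by the inverse of each command (delta looked up in a table) and finally tests whether the origin (0,0) lies among the regressed destinations, whereas A accumulates the robot's position with an if/elif ladder and tests it against the fixed destinations.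
import Mathlib
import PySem

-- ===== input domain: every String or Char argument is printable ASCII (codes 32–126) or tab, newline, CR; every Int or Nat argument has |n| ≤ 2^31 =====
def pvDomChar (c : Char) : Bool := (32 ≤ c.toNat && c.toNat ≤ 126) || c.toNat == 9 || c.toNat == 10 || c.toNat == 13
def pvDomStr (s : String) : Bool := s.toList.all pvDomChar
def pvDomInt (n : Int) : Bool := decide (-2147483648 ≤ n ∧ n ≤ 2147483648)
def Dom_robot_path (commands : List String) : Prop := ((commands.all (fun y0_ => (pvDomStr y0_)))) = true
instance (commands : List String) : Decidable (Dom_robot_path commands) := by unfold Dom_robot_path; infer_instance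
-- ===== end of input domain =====

-- B is a goal-regression algorithm: it never tracks the robot, it shifts the two target
-- destinations by the inverse of each command and tests whether the origin survives.

-- ===== PORT A =====
def robot_path (commands : List String) : Bool :=
  -- x_pos, y_pos = 0, 0; for command in commands: if/elif ladder
  let p := commands.foldl (fun (st : Int × Int) command =>
    if command == "n" then (st.1, st.2 + 1)
    else if command == "e" then (st.1 + 1, st.2)
    else if command == "s" then (st.1, st.2 - 1)
    else if command == "w" then (st.1 - 1, st.2)
    else st) ((0 : Int), (0 : Int))
  -- if [x_pos, y_pos] in required_dest: return True / return False
  if [p.1, p.2] ∈ [[(3 : Int), 2], [-4, 3]] then true else false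

-- ===== PORT B =====
def robot_path_alt (commands : List String) : Bool :=
  let delta : PySem.Dict String (Int × Int) :=
    PySem.Dict.ofList [("n", (0, 1)), ("e", (1, 0)), ("s", (0, -1)), ("w", (-1, 0))]
  let goals := commands.foldl (fun (goals : List (Int × Int)) command =>
    let d := PySem.Dict.getD delta command (0, 0)
    goals.map (fun g => (g.1 - d.1, g.2 - d.2))) [((3 : Int), (2 : Int)), (-4, 3)]
  decide (((0 : Int), (0 : Int)) ∈ goals)

-- ===== PRECONDITION & SPEC =====
def Spec_robot_path (commands : List String) (out : Bool) : Prop := out = robot_path_alt commands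
instance (commands : List String) (out : Bool) : Decidable (Spec_robot_path commands out) := by unfold Spec_robot_path; infer_instance

-- ===== CLAIM (what is proved, stated in full; the proofs are below) =====
def Claim_equal_robot_path : Prop := ∀ (commands : List String), Dom_robot_path commands → Spec_robot_path commands (robot_path commands)

-- ===== LEMMAS AND PROOFS =====

-- The net displacement of one command, as A's ladder adds it.
def pvDelta (command : String) : Int × Int :=
  if command = "n" then (0, 1)
  else if command = "e" then (1, 0)
  else if command = "s" then (0, -1)
  else if command = "w" then (-1, 0)
  else (0, 0)

theorem pvDelta_eq_getD (command : String) :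
    PySem.Dict.getD (PySem.Dict.ofList
      [("n", ((0 : Int), (1 : Int))), ("e", (1, 0)), ("s", (0, -1)), ("w", (-1, 0))])
      command (0, 0) = pvDelta command := by
  have hmk : PySem.Dict.ofList
      [("n", ((0 : Int), (1 : Int))), ("e", (1, 0)), ("s", (0, -1)), ("w", (-1, 0))]
      = PySem.Dict.mk [("n", (0, 1)), ("e", (1, 0)), ("s", (0, -1)), ("w", (-1, 0))] := by
    decide
  rw [hmk]
  unfold pvDelta
  by_cases hn : command = "n"
  · subst hn; decide
  by_cases he : command = "e"
  · subst he; decide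
  by_cases hs : command = "s"
  · subst hs; decide
  by_cases hw : command = "w"
  · subst hw; decide
  simp only [PySem.Dict.getD, PySem.Dict.get?_mk_cons, hn, he, hs, hw,
    beq_iff_eq, Ne.symm hn, Ne.symm he, Ne.symm hs, Ne.symm hw, if_false]
  simp [PySem.Dict.get?]

-- One step of A's if/elif ladder adds pvDelta of the command.
theorem pvStep_eq (c : String) (x0 y0 : Int) :
    (if c == "n" then (x0, y0 + 1)
     else if c == "e" then (x0 + 1, y0)
     else if c == "s" then (x0, y0 - 1)
     else if c == "w" then (x0 - 1, y0)
     else (x0, y0))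
    = (x0 + (pvDelta c).1, y0 + (pvDelta c).2) := by
  unfold pvDelta
  by_cases hn : c = "n"
  · subst hn; simp
  by_cases he : c = "e"
  · subst he; simp [hn]
  by_cases hs : c = "s"
  · subst hs; simp [hn, he]; ring
  by_cases hw : c = "w"
  · subst hw; simp [hn, he, hs]; ring
  simp [hn, he, hs, hw]

-- A's fold accumulates the sum of per-command deltas.
theorem robot_path_fold_eq (commands : List String) (x0 y0 : Int) :
    commands.foldl (fun (st : Int × Int) command =>
      if command == "n" then (st.1, st.2 + 1)
      else if command == "e" then (st.1 + 1, st.2)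
      else if command == "s" then (st.1, st.2 - 1)
      else if command == "w" then (st.1 - 1, st.2)
      else st) (x0, y0)
    = (x0 + (commands.map (fun c => (pvDelta c).1)).sum,
       y0 + (commands.map (fun c => (pvDelta c).2)).sum) := by
  induction commands generalizing x0 y0 with
  | nil => simp
  | cons c cs ih =>
    simp only [List.foldl_cons, List.map_cons, List.sum_cons]
    rw [pvStep_eq, ih]
    simp only [Prod.mk.injEq]
    constructor <;> ring

-- B's fold shifts every goal by the total delta, negated.
theorem robot_path_alt_fold_eq (commands : List String) (gs : List (Int × Int)) :
    commands.foldl (fun (goals : List (Int × Int)) command =>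
      let d := PySem.Dict.getD (PySem.Dict.ofList
        [("n", ((0 : Int), (1 : Int))), ("e", (1, 0)), ("s", (0, -1)), ("w", (-1, 0))])
        command (0, 0)
      goals.map (fun g => (g.1 - d.1, g.2 - d.2))) gs
    = gs.map (fun g => (g.1 - (commands.map (fun c => (pvDelta c).1)).sum,
                        g.2 - (commands.map (fun c => (pvDelta c).2)).sum)) := by
  induction commands generalizing gs with
  | nil => simp
  | cons c cs ih =>
    simp only [List.foldl_cons]
    rw [ih, List.map_map]
    simp only [List.map_cons, List.sum_cons]
    apply List.map_congr_left
    intro g _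
    simp only [Function.comp, pvDelta_eq_getD]
    simp only [Prod.mk.injEq]
    constructor <;> ring

-- ===== VERDICT (by name: the statement is the Claim_ definition above) =====
theorem robot_path_spec : Claim_equal_robot_path := by
  intro commands _
  unfold Spec_robot_path
  simp only [robot_path, robot_path_alt, robot_path_fold_eq, robot_path_alt_fold_eq]
  simp only [List.map_cons, List.map_nil, List.mem_cons, List.not_mem_nil, or_false,
    List.cons.injEq, and_true, Prod.mk.injEq]
  split_ifs with h
  · symm
    simp only [decide_eq_true_eq]
    rcases h with ⟨h1, h2⟩ | ⟨h1, h2⟩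
    · left; constructor <;> omega
    · right; constructor <;> omega
  · symm
    simp only [decide_eq_false_iff_not]
    intro hc
    apply h
    rcases hc with ⟨h1, h2⟩ | ⟨h1, h2⟩
    · left; constructor <;> omega
    · right; constructor <;> omega
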